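-- pv_equiv track=rewrite | github.com/akash29/Practice_problems | Others/contiguous_nums.py | check_contiguous
-- ===== SOURCE A (Python) =====
-- def check_contiguous(lst):
--     sorted_lst = sorted(set(lst))
--     sub_lst = [(sorted_lst[i]-sorted_lst[0])+1 for i in range(len(sorted_lst))]
--     sum_lst = sum(sub_lst)
--     lst_len = len(sorted_lst)
--     expected_len = (lst_len*(lst_len+1))//2
--     if expected_len==sum_lst:
--         return 'Yes'
--     return 'No'
-- ===== SOURCE B (Python) =====
-- def check_contiguous(lst):
--     if not lst:
--         return 'Yes'
--     s = set(lst)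
--     return 'Yes' if max(s) - min(s) + 1 == len(s) else 'No'
-- ===== Notes on version B (the rewrite author's own statement) =====
-- stated objective: simpler
-- what changed: B drops the sort, the shifted comprehension and the triangular-number sum entirely: it tests contiguity as an interval-width check, max(set)-min(set)+1 == len(set), correct because n distinct integers occupy an interval of width n exactly when they are consecutive, which is exactly when A's shifted sum hits n(n+1)/2.
import Mathlib
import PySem

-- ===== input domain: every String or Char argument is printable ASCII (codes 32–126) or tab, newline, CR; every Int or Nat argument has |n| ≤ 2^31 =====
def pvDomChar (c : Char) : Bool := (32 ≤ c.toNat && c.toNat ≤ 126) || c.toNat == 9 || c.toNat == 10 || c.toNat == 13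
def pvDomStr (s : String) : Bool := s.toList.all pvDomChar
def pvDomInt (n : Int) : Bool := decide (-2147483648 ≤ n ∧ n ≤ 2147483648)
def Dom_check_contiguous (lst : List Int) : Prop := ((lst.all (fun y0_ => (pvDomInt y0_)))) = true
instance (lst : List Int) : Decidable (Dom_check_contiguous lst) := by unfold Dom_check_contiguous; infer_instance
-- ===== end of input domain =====

-- B replaces A's sort + shifted comprehension + triangular-number comparison by the
-- plainer interval-width check max(set)-min(set)+1 == len(set) (return value only).

-- ===== PORT A =====
def check_contiguous (lst : List Int) : String :=
  let sorted_lst := PySem.List.sorted (PySem.Set.ofList lst) (fun x => x) false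
  -- indices drawn from range(len(sorted_lst)) are in range, so pyGetD is exact here
  let sub_lst := (PySem.List.pyRange 0 (sorted_lst.length : Int) 1).map
      (fun i => (PySem.List.pyGetD sorted_lst i 0 - PySem.List.pyGetD sorted_lst 0 0) + 1)
  let sum_lst := sub_lst.sum
  let lst_len : Int := sorted_lst.length
  let expected_len := PySem.Int.floordiv (lst_len * (lst_len + 1)) 2
  if expected_len = sum_lst then "Yes" else "No"

-- ===== PORT B =====
def check_contiguous_alt (lst : List Int) : String :=
  if lst = [] then "Yes"
  else
    let s := PySem.Set.ofList lst
    -- s is nonempty here, so max?/min? are some and the defaults are never used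
    if (PySem.List.max? s (fun x => x)).getD 0 - (PySem.List.min? s (fun x => x)).getD 0 + 1
        = (s.length : Int)
    then "Yes" else "No"

-- ===== PRECONDITION & SPEC =====
def Spec_check_contiguous (lst : List Int) (out : String) : Prop := out = check_contiguous_alt lst
instance (lst : List Int) (out : String) : Decidable (Spec_check_contiguous lst out) := by unfold Spec_check_contiguous; infer_instance

-- ===== CLAIM =====
def Claim_equal_check_contiguous : Prop := ∀ (lst : List Int), Dom_check_contiguous lst → Spec_check_contiguous lst (check_contiguous lst)

-- ===== LEMMAS AND PROOFS =====

-- sum of the shifted list, in closed form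
theorem pv_sum_shift (t : List Int) (m : Int) :
    (t.map (fun x => x - m + 1)).sum = t.sum - (t.length : Int) * m + t.length := by
  induction t with
  | nil => simp
  | cons x t ih => simp [ih]; ring

-- lower bound: a strictly increasing list with all elements ≥ m
theorem pv_sum_lower (t : List Int) (m : Int) (hp : t.Pairwise (· < ·))
    (hm : ∀ x ∈ t, m ≤ x) :
    2 * (t.length : Int) * m + (t.length : Int) * ((t.length : Int) - 1) ≤ 2 * t.sum := by
  induction t generalizing m with
  | nil => simp
  | cons x rest ih =>
    have hx : m ≤ x := hm x (by simp)
    have hrest : ∀ y ∈ rest, x + 1 ≤ y := fun y hy =>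
      Int.add_one_le_iff.mpr ((List.pairwise_cons.mp hp).1 y hy)
    have hIH := ih (x + 1) (List.pairwise_cons.mp hp).2 hrest
    have hk : (0 : Int) ≤ (rest.length : Int) := by positivity
    simp only [List.length_cons, List.sum_cons] at *
    push_cast at *
    nlinarith [hIH, hk, hx]

-- last-element lower bound for strictly increasing lists above m
theorem pv_last_lower (t : List Int) (m L : Int) (hp : t.Pairwise (· < ·))
    (hm : ∀ x ∈ t, m < x) (hL : t.getLast? = some L) :
    m + (t.length : Int) ≤ L := by
  induction t generalizing m with
  | nil => simp at hL
  | cons x rest ih =>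
    have hx : m < x := hm x (by simp)
    cases rest with
    | nil =>
      simp at hL
      simp [← hL]
      omega
    | cons y rs =>
      have hL' : (y :: rs).getLast? = some L := by
        simpa [List.getLast?_cons_cons] using hL
      have hrest : ∀ z ∈ (y :: rs), x < z := (List.pairwise_cons.mp hp).1
      have := ih x (List.pairwise_cons.mp hp).2 hrest hL'
      simp only [List.length_cons] at *
      push_cast at *
      omega

-- upper bound via the last element
theorem pv_sum_upper (t : List Int) (L : Int) (hp : t.Pairwise (· < ·))
    (hL : t.getLast? = some L) :
    2 * t.sum ≤ 2 * (t.length : Int) * L - (t.length : Int) * ((t.length : Int) - 1) := by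
  induction t with
  | nil => simp at hL
  | cons x rest ih =>
    cases rest with
    | nil =>
      simp at hL
      simp [hL]
    | cons y rs =>
      have hL' : (y :: rs).getLast? = some L := by
        simpa [List.getLast?_cons_cons] using hL
      have hrest : ∀ z ∈ (y :: rs), x < z := (List.pairwise_cons.mp hp).1
      have hxL : x + ((y :: rs).length : Int) ≤ L :=
        pv_last_lower (y :: rs) x L (List.pairwise_cons.mp hp).2 hrest hL'
      have hIH := ih (List.pairwise_cons.mp hp).2 hL'
      have hk : (0 : Int) ≤ ((y :: rs).length : Int) := by positivity
      simp only [List.length_cons, List.sum_cons] at *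
      push_cast at *
      nlinarith [hIH, hxL, hk]

-- the heart: for a nonempty strictly increasing list with head m and last L,
-- the shifted sum hits the triangular number iff the interval width equals the length
theorem pv_triangular_iff_width (t : List Int) (m L : Int) (hp : t.Pairwise (· < ·))
    (hhead : t.head? = some m) (hlast : t.getLast? = some L) :
    (2 * t.sum = 2 * (t.length : Int) * m + (t.length : Int) * ((t.length : Int) - 1)
      ↔ L - m + 1 = (t.length : Int)) := by
  obtain ⟨tl, rfl⟩ : ∃ tl, t = m :: tl := by
    cases t with
    | nil => simp at hhead
    | cons x tl =>
      have hx : x = m := by simpa using hhead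
      exact ⟨tl, by rw [hx]⟩
  have hmem : ∀ z ∈ (m :: tl), m ≤ z := by
    intro z hz
    rcases List.mem_cons.mp hz with h | h
    · omega
    · exact le_of_lt ((List.pairwise_cons.mp hp).1 z h)
  constructor
  · -- sum equality forces L = m + n - 1
    intro hsum
    have hub := pv_sum_upper (m :: tl) L hp hlast
    -- decompose into dropLast ++ [L] for the other direction of the bound
    have hne : (m :: tl) ≠ [] := by simp
    have hdec : (m :: tl) = (m :: tl).dropLast ++ [(m :: tl).getLast hne] :=
      (List.dropLast_append_getLast hne).symm
    have hLget : (m :: tl).getLast hne = L := by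
      have h := List.getLast?_eq_some_getLast (l := m :: tl) hne
      rw [h] at hlast
      exact Option.some_inj.mp hlast
    have hpd : (m :: tl).dropLast.Pairwise (· < ·) :=
      hp.sublist (List.dropLast_sublist _)
    have hmd : ∀ z ∈ (m :: tl).dropLast, m ≤ z := fun z hz =>
      hmem z (List.mem_of_mem_dropLast hz)
    have hlb := pv_sum_lower (m :: tl).dropLast m hpd hmd
    have hsum_dec : (m :: tl).sum = (m :: tl).dropLast.sum + L := by
      conv_lhs => rw [hdec]
      simp [hLget]
    have hlen_dec : ((m :: tl).length : Int) = ((m :: tl).dropLast.length : Int) + 1 := by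
      conv_lhs => rw [hdec]
      simp only [List.length_append, List.length_cons, List.length_nil]
      push_cast
      omega
    have hn1 : (1 : Int) ≤ ((m :: tl).length : Int) := by
      simp only [List.length_cons]; push_cast; omega
    set n : Int := ((m :: tl).length : Int) with hn
    have hge : m + n - 1 ≤ L := by nlinarith [hsum, hub, hn1]
    have hle : L ≤ m + n - 1 := by
      rw [hsum_dec, hlen_dec] at hsum
      nlinarith [hlb, hsum]
    omega
  · -- L = m + n - 1 forces the sum equality, by squeezing
    intro hw
    have hub := pv_sum_upper (m :: tl) L hp hlast
    have hlb := pv_sum_lower (m :: tl) m hp hmem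
    have hn1 : (1 : Int) ≤ ((m :: tl).length : Int) := by
      simp only [List.length_cons]; push_cast; omega
    set n : Int := ((m :: tl).length : Int) with hn
    have hL' : L = m + n - 1 := by omega
    subst hL'
    nlinarith [hub, hlb]

theorem check_contiguous_spec_aux (lst : List Int) :
    check_contiguous lst = check_contiguous_alt lst := by
  by_cases hnil : lst = []
  · subst hnil; decide
  · have hs : PySem.Set.ofList lst ≠ [] := by
      intro h
      rcases lst with _ | ⟨x, tl⟩
      · exact hnil rfl
      · have : x ∈ PySem.Set.ofList (x :: tl) := (PySem.Set.mem_ofList _ _).2 (by simp)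
        simp [h] at this
    set s := PySem.Set.ofList lst with hsdef
    set t := PySem.List.sorted s (fun x => x) false with htdef
    have ht : t ≠ [] := fun h => hs ((PySem.List.sorted_eq_nil_iff _ _ _).1 h)
    obtain ⟨m, tl, htm⟩ : ∃ m tl, t = m :: tl := by
      rcases t with _ | ⟨m, tl⟩
      · exact absurd rfl ht
      · exact ⟨m, tl, rfl⟩
    have hperm : t.Perm s := PySem.List.sorted_perm ..
    have hlen : t.length = s.length := hperm.length_eq
    have hsum : t.sum = s.sum := hperm.sum_eq
    have hpair : t.Pairwise (· < ·) := htdef ▸ hsdef ▸ PySem.List.sorted_ofList_pairwise_lt ..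
    -- the comprehension is just t shifted
    have hmap : (PySem.List.pyRange 0 (t.length : Int) 1).map
        (fun i => (PySem.List.pyGetD t i 0 - PySem.List.pyGetD t 0 0) + 1)
        = t.map (fun x => x - PySem.List.pyGetD t 0 0 + 1) := by
      have h0 : (PySem.List.pyRange 0 (t.length : Int) 1).map
          (fun i => PySem.List.pyGetD t i 0) = t := PySem.List.map_pyGetD_pyRange_zero ..
      calc (PySem.List.pyRange 0 (t.length : Int) 1).map
            (fun i => (PySem.List.pyGetD t i 0 - PySem.List.pyGetD t 0 0) + 1)
          = ((PySem.List.pyRange 0 (t.length : Int) 1).map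
              (fun i => PySem.List.pyGetD t i 0)).map
              (fun x => x - PySem.List.pyGetD t 0 0 + 1) := by
            rw [List.map_map]; rfl
        _ = t.map (fun x => x - PySem.List.pyGetD t 0 0 + 1) := by rw [h0]
    have hm0 : PySem.List.pyGetD t 0 0 = m := by simp [htm, PySem.List.pyGetD]
    -- head of the sorted list is min? of the set
    have hmin : PySem.List.min? s (fun x => x) = some m := by
      obtain ⟨mv, hmv⟩ : ∃ mv, PySem.List.min? s (fun x => x) = some mv := by
        rcases h : PySem.List.min? s (fun x => x) with _ | mv
        · exact absurd ((PySem.List.min?_eq_none_iff ..).1 h) hs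
        · exact ⟨mv, rfl⟩
      have hmv_mem : mv ∈ s := PySem.List.min?_mem hmv
      have hm_mem : m ∈ s := hperm.mem_iff.1 (by simp [htm])
      have hm_min : ∀ y ∈ s, m ≤ y := fun y hy =>
        PySem.List.key_head_sorted_le s (fun x => x) (htdef ▸ htm) y hy
      rw [hmv]
      exact congrArg some (le_antisymm (PySem.List.min?_isMin hmv m hm_mem) (hm_min mv hmv_mem))
    -- last of the sorted list is max? of the set
    have hLdef : t.getLast? = some (t.getLast ht) := List.getLast?_eq_some_getLast ht
    set L : Int := t.getLast ht with hLeq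
    have hL_mem : L ∈ s := hperm.mem_iff.1 (List.getLast_mem ht)
    have hL_max : ∀ y ∈ s, y ≤ L := by
      intro y hy
      have hyt : y ∈ t := hperm.mem_iff.2 hy
      obtain ⟨i, hi, hig⟩ := List.getElem_of_mem hyt
      have hlast : t.getLast ht = t[t.length - 1]'(by
        have := List.length_pos_iff.mpr ht; omega) := List.getLast_eq_getElem ht
      calc y = t[i] := hig.symm
        _ ≤ t[t.length - 1]'(by have := List.length_pos_iff.mpr ht; omega) := by
              rcases eq_or_lt_of_le (Nat.le_sub_one_of_lt hi) with h | h
              · exact le_of_eq (by congr 1)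
              · exact le_of_lt (List.pairwise_iff_getElem.mp hpair i (t.length - 1) hi
                  (by have := List.length_pos_iff.mpr ht; omega) h)
        _ = L := by rw [← hlast, hLeq]
    have hmax : PySem.List.max? s (fun x => x) = some L := by
      obtain ⟨Mv, hMv⟩ : ∃ Mv, PySem.List.max? s (fun x => x) = some Mv := by
        rcases h : PySem.List.max? s (fun x => x) with _ | Mv
        · exact absurd ((PySem.List.max?_eq_none_iff ..).1 h) hs
        · exact ⟨Mv, rfl⟩
      have hMv_mem : Mv ∈ s := PySem.List.max?_mem hMv
      rw [hMv]
      exact congrArg some (le_antisymm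
        (hL_max Mv hMv_mem) (PySem.List.max?_isMax hMv L hL_mem))
    -- the central equivalence
    have hiff := pv_triangular_iff_width t m L hpair (by simp [htm]) hLdef
    -- floordiv: with n(n+1) even, E = S ↔ 2S = n(n+1)
    have heven : (2 : Int) ∣ (t.length : Int) * ((t.length : Int) + 1) := by
      exact_mod_cast (Int.even_mul_succ_self (t.length : Int)).two_dvd
    -- unfold both programs
    show (if PySem.Int.floordiv ((t.length : Int) * ((t.length : Int) + 1)) 2
            = ((PySem.List.pyRange 0 (t.length : Int) 1).map
                (fun i => (PySem.List.pyGetD t i 0 - PySem.List.pyGetD t 0 0) + 1)).sum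
          then "Yes" else "No")
        = check_contiguous_alt lst
    rw [hmap, hm0, pv_sum_shift]
    simp only [check_contiguous_alt, if_neg hnil, ← hsdef, hmin, hmax, Option.getD_some]
    have hAiff : PySem.Int.floordiv ((t.length : Int) * ((t.length : Int) + 1)) 2
        = t.sum - (t.length : Int) * m + (t.length : Int)
        ↔ L - m + 1 = (s.length : Int) := by
      obtain ⟨c, hc⟩ := heven
      have hring : (t.length : Int) * ((t.length : Int) + 1)
          = (t.length : Int) * ((t.length : Int) - 1) + 2 * (t.length : Int) := by ring
      rw [hc, PySem.Int.floordiv_eq_iff_of_pos (by omega), ← hlen]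
      constructor
      · intro ⟨h1, h2⟩
        apply hiff.mp
        have hq : t.sum - (t.length : Int) * m + (t.length : Int) = c := by omega
        linarith [hc, hring, hq]
      · intro hw
        have h := hiff.mpr hw
        have : t.sum - (t.length : Int) * m + (t.length : Int) = c := by
          linarith [hc, hring]
        omega
    by_cases hA : PySem.Int.floordiv ((t.length : Int) * ((t.length : Int) + 1)) 2
        = t.sum - (t.length : Int) * m + (t.length : Int)
    · rw [if_pos hA, if_pos (hAiff.mp hA)]
    · rw [if_neg hA, if_neg (fun hw => hA (hAiff.mpr hw))]

-- ===== VERDICT =====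
theorem check_contiguous_spec : Claim_equal_check_contiguous := by
  intro lst _
  exact check_contiguous_spec_aux lst
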